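-- pv_equiv track=rewrite | github.com/kishonyWIS/bb_code_with_time_vortex | generate_4d_lattices.py | get_points_in_parallelogram
-- ===== SOURCE A (Python) =====
-- def get_points_in_parallelogram(m, l, q):
--     """
--     Get all integer points (a, b) in the half-open parallelogram
--     spanned by (0, m) and (l, q).
--
--     The parallelogram is: {s*(0,m) + t*(l,q) : s, t in [0, 1)}
--     Area = m*l (absolute value of determinant)
--
--     The transformation from (s,t) to (a,b) is:
--     [a]   [0  l] [s]
--     [b] = [m q] [t]
--
--     So: a = t*l, b = s*m + t*q
--
--     The inverse transformation (from (a,b) to (s,t)) is: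
--     [s] = (1/det) * [[q, -l], [-m, 0]] * [a]  where det = -m*l
--     [t]                                    [b]
--
--     So: s = (l*b - q*a) / (m*l)
--         t = a/l
--
--     For (s, t) in [0, 1) x [0, 1):
--     - 0 <= a/l < 1  =>  0 <= a < l  (if l > 0)
--     - 0 <= (l*b - q*a) / (m*l) < 1  =>  0 <= l*b - q*a < m*l
--                                          =>  q*a <= l*b < q*a + m*l
--
--     Args:
--         m, l, q: Parameters defining the parallelogram (m, l > 0)
--
--     Returns:
--         List of (a, b) tuples representing integer points in the parallelogram
--     """
--     points = []
--
--     if l == 0: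
--         # Degenerate case
--         return [(0, 0)]
--
--     # Bounding box for the parallelogram
--     corners = [(0, 0), (l, q), (0, m), (l, q + m)]
--     min_a = min(c[0] for c in corners)
--     max_a = max(c[0] for c in corners)
--     min_b = min(c[1] for c in corners)
--     max_b = max(c[1] for c in corners)
--
--     det_2d = -m * l  # Determinant of [[0, l], [m, q]]
--
--     for a in range(min_a, max_a + 1):
--         # Check t = a/l in [0, 1)
--         if a < 0 or a >= l:
--             continue
--
--         for b in range(min_b, max_b + 1):
--             # Check s = (l*b - q*a) / (m*l) in [0, 1)
--             numerator = l * b - q * a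
--             if numerator < 0 or numerator >= m * l:
--                 continue
--
--             points.append((a, b))
--
--     return points
-- ===== SOURCE B (Python) =====
-- def get_points_in_parallelogram(m, l, q):
--     """For each a in [0, l), the valid b form m consecutive integers
--     starting at ceil(q*a/l); emit them directly (output-sensitive)."""
--     if l == 0:
--         return [(0, 0)]
--     points = []
--     for a in range(l):
--         b0 = -((-q * a) // l)  # ceil(q*a/l); l > 0 whenever this runs
--         for k in range(m):
--             points.append((a, b0 + k))
--     return points
-- ===== Notes on version B (the rewrite author's own statement) =====
-- stated objective: faster
-- what changed: Instead of scanning the whole bounding box and filtering each candidate b, B computes for each a the first valid b as ceil(q*a/l) and emits the m consecutive valid values directly, so the inner scan over the b bounding range disappears.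
import Mathlib
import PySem

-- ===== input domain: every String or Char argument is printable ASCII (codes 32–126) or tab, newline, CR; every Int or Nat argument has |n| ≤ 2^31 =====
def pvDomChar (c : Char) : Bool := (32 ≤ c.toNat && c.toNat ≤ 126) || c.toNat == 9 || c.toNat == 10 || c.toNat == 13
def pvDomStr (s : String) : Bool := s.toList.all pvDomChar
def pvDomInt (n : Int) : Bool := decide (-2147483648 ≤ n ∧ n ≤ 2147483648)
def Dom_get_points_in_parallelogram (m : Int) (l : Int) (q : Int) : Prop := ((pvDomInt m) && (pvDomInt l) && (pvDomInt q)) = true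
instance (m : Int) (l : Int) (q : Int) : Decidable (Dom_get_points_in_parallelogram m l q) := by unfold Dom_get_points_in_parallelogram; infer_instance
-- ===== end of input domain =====

-- B replaces A's filtered scan of the whole bounding box by directly emitting, for each a,
-- the m consecutive valid b values starting at ceil(q*a/l) (objective: faster).

-- ===== PORT A =====
def get_points_in_parallelogram (m : Int) (l : Int) (q : Int) : List (Int × Int) :=
  if l = 0 then [(0, 0)]
  else
    let corners : List (Int × Int) := [(0, 0), (l, q), (0, m), (l, q + m)]
    -- Python min/max over a nonempty generator; .getD 0 only totalizes (the list is nonempty)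
    let min_a := (PySem.List.min? (corners.map (fun c => c.1)) (fun x => x)).getD 0
    let max_a := (PySem.List.max? (corners.map (fun c => c.1)) (fun x => x)).getD 0
    let min_b := (PySem.List.min? (corners.map (fun c => c.2)) (fun x => x)).getD 0
    let max_b := (PySem.List.max? (corners.map (fun c => c.2)) (fun x => x)).getD 0
    (PySem.List.pyRange min_a (max_a + 1) 1).foldl (fun points a =>
      if a < 0 ∨ a ≥ l then points   -- continue
      else
        (PySem.List.pyRange min_b (max_b + 1) 1).foldl (fun points b =>
          let numerator := l * b - q * a
          if numerator < 0 ∨ numerator ≥ m * l then points   -- continue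
          else points ++ [(a, b)]) points) []

-- ===== PORT B =====
def get_points_in_parallelogram_alt (m : Int) (l : Int) (q : Int) : List (Int × Int) :=
  if l = 0 then [(0, 0)]
  else
    (PySem.List.pyRange 0 l 1).foldl (fun points a =>
      let b0 := -(PySem.Int.floordiv (-q * a) l)   -- ceil(q*a/l); l > 0 whenever this runs
      (PySem.List.pyRange 0 m 1).foldl (fun points k => points ++ [(a, b0 + k)]) points) []

-- ===== PRECONDITION & SPEC =====
def Spec_get_points_in_parallelogram (m : Int) (l : Int) (q : Int) (out : List (Int × Int)) : Prop := out = get_points_in_parallelogram_alt m l q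
instance (m : Int) (l : Int) (q : Int) (out : List (Int × Int)) : Decidable (Spec_get_points_in_parallelogram m l q out) := by unfold Spec_get_points_in_parallelogram; infer_instance

-- ===== CLAIM (what is proved, stated in full; the proofs are below) =====
def Claim_equal_get_points_in_parallelogram : Prop := ∀ (m : Int) (l : Int) (q : Int), Dom_get_points_in_parallelogram m l q → Spec_get_points_in_parallelogram m l q (get_points_in_parallelogram m l q)

-- ===== LEMMAS AND PROOFS =====

-- b0 = ceil(q*a/l) characterizes A's inner acceptance test as a half-open interval of b.
theorem pv_accept_iff (m l q a b0 b : Int) (hl : 0 < l)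
    (h1 : (b0 - 1) * l < q * a) (h2 : q * a ≤ b0 * l) :
    (¬(l * b - q * a < 0 ∨ l * b - q * a ≥ m * l)) ↔ (b0 ≤ b ∧ b < b0 + m) := by
  rw [not_or, not_lt, not_le]
  constructor
  · rintro ⟨hge, hlt⟩
    constructor
    · by_contra hb
      have hb' : b ≤ b0 - 1 := by omega
      nlinarith
    · nlinarith
  · rintro ⟨hle, hlt⟩
    have hlt' : b ≤ b0 + m - 1 := by omega
    constructor
    · nlinarith
    · nlinarith

-- bounds of b0 inside A's bounding box
theorem pv_b0_bounds (l q a b0 : Int) (hl : 0 < l) (ha0 : 0 ≤ a) (hal : a < l)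
    (h1 : (b0 - 1) * l < q * a) (h2 : q * a ≤ b0 * l) :
    min 0 q ≤ b0 ∧ b0 ≤ max 0 q := by
  rcases le_or_gt 0 q with hq | hq
  · have hb0l : 0 ≤ b0 * l := le_trans (mul_nonneg hq ha0) h2
    have hb0 : 0 ≤ b0 := by nlinarith
    have hqa : q * a ≤ q * (l - 1) := by nlinarith
    have : b0 - 1 < q := by nlinarith
    omega
  · have hqa0 : q * a ≤ 0 := mul_nonpos_of_nonpos_of_nonneg (le_of_lt hq) ha0
    have hb0 : b0 - 1 < 0 := by nlinarith
    have hqa : q * (l - 1) ≤ q * a := by nlinarith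
    have h3 : (q - 1) * l < b0 * l := by nlinarith
    have : q - 1 < b0 := by nlinarith
    omega

-- a filter by an interval predicate over a covering range is the sub-range
theorem pv_filter_interval (lo hi c d : Int) (P : Int → Prop) [DecidablePred P]
    (hP : ∀ b, P b ↔ c ≤ b ∧ b < d) (hlo : lo ≤ c) (hcd : c ≤ d) (hhi : d ≤ hi) :
    (PySem.List.pyRange lo hi 1).filter (fun b => decide (P b)) = PySem.List.pyRange c d 1 := by
  rw [PySem.List.pyRange_one_append lo c hi hlo (le_trans hcd hhi),
      PySem.List.pyRange_one_append c d hi hcd hhi, List.filter_append, List.filter_append]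
  have e1 : (PySem.List.pyRange lo c 1).filter (fun b => decide (P b)) = [] := by
    rw [List.filter_eq_nil_iff]
    intro b hb
    rw [PySem.List.mem_pyRange_one] at hb
    simp only [decide_eq_true_eq, hP b]
    omega
  have e2 : (PySem.List.pyRange c d 1).filter (fun b => decide (P b)) = PySem.List.pyRange c d 1 := by
    rw [List.filter_eq_self]
    intro b hb
    rw [PySem.List.mem_pyRange_one] at hb
    simp only [decide_eq_true_eq, hP b]
    omega
  have e3 : (PySem.List.pyRange d hi 1).filter (fun b => decide (P b)) = [] := by
    rw [List.filter_eq_nil_iff]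
    intro b hb
    rw [PySem.List.mem_pyRange_one] at hb
    simp only [decide_eq_true_eq, hP b]
    omega
  rw [e1, e2, e3]
  simp

-- ===== VERDICT (by name: the statement is the Claim_ definition above) =====
theorem get_points_in_parallelogram_spec : Claim_equal_get_points_in_parallelogram := by
  intro m l q _
  unfold Spec_get_points_in_parallelogram get_points_in_parallelogram get_points_in_parallelogram_alt
  by_cases hl0 : l = 0
  · simp [hl0]
  · simp only [if_neg hl0]
    simp only [List.map_cons, List.map_nil, PySem.List.min?_id_cons, PySem.List.max?_id_cons,
      List.foldl_cons, List.foldl_nil, Option.getD_some]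
    -- A's inner loop is an append of a filtered, mapped range
    have hinner : ∀ (acc : List (Int × Int)) (a lo hi : Int),
        (PySem.List.pyRange lo hi 1).foldl (fun points b =>
          if l * b - q * a < 0 ∨ l * b - q * a ≥ m * l then points
          else points ++ [(a, b)]) acc
        = acc ++ ((PySem.List.pyRange lo hi 1).filter
            (fun b => decide (¬(l * b - q * a < 0 ∨ l * b - q * a ≥ m * l)))).map (fun b => (a, b)) := by
      intro acc a lo hi
      rw [← PySem.List.foldl_append_ite (fun b => ¬(l * b - q * a < 0 ∨ l * b - q * a ≥ m * l))
            (fun b => (a, b)) _ acc]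
      congr 1
      funext pts b
      by_cases h : l * b - q * a < 0 ∨ l * b - q * a ≥ m * l
      · rw [if_pos h, if_neg (not_not_intro h)]
      · rw [if_neg h, if_pos h]
    simp only [hinner]
    -- both outer loops are flatMaps
    have hA : ∀ (lo hi : Int), (PySem.List.pyRange lo hi 1).foldl (fun points a =>
          if a < 0 ∨ a ≥ l then points
          else points ++ ((PySem.List.pyRange (min (min (min 0 q) m) (q + m))
              (max (max (max 0 q) m) (q + m) + 1) 1).filter
              (fun b => decide (¬(l * b - q * a < 0 ∨ l * b - q * a ≥ m * l)))).map (fun b => (a, b))) []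
        = (PySem.List.pyRange lo hi 1).flatMap (fun a =>
            if a < 0 ∨ a ≥ l then []
            else ((PySem.List.pyRange (min (min (min 0 q) m) (q + m))
              (max (max (max 0 q) m) (q + m) + 1) 1).filter
              (fun b => decide (¬(l * b - q * a < 0 ∨ l * b - q * a ≥ m * l)))).map (fun b => (a, b))) := by
      intro lo hi
      have hbody : (fun (points : List (Int × Int)) (a : Int) =>
          if a < 0 ∨ a ≥ l then points
          else points ++ ((PySem.List.pyRange (min (min (min 0 q) m) (q + m))
              (max (max (max 0 q) m) (q + m) + 1) 1).filter
              (fun b => decide (¬(l * b - q * a < 0 ∨ l * b - q * a ≥ m * l)))).map (fun b => (a, b)))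
        = (fun points a => points ++ (if a < 0 ∨ a ≥ l then []
            else ((PySem.List.pyRange (min (min (min 0 q) m) (q + m))
              (max (max (max 0 q) m) (q + m) + 1) 1).filter
              (fun b => decide (¬(l * b - q * a < 0 ∨ l * b - q * a ≥ m * l)))).map (fun b => (a, b)))) := by
        funext pts a
        by_cases h : a < 0 ∨ a ≥ l
        · rw [if_pos h, if_pos h, List.append_nil]
        · rw [if_neg h, if_neg h]
      rw [hbody, PySem.List.foldl_append_eq_flatMap, List.nil_append]
    have hB : (PySem.List.pyRange 0 l 1).foldl (fun points a =>
          (PySem.List.pyRange 0 m 1).foldl (fun points k =>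
            points ++ [(a, -(PySem.Int.floordiv (-q * a) l) + k)]) points) []
        = (PySem.List.pyRange 0 l 1).flatMap (fun a =>
            (PySem.List.pyRange 0 m 1).map (fun k => (a, -(PySem.Int.floordiv (-q * a) l) + k))) := by
      simp only [PySem.List.foldl_append_singleton_eq_map]
      rw [PySem.List.foldl_append_eq_flatMap, List.nil_append]
    rw [hA, hB]
    rcases lt_or_gt_of_ne hl0 with hl | hl
    · -- l < 0 : both sides empty (every a is filtered out; B's range is empty)
      have h1 : min (min (min 0 l) 0) l = l := by omega
      have h2 : max (max (max 0 l) 0) l = 0 := by omega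
      rw [h1, h2, PySem.List.pyRange_one_eq_nil (show l ≤ (0:Int) by omega), List.flatMap_nil,
        List.flatMap_eq_nil_iff]
      intro a ha
      rw [PySem.List.mem_pyRange_one] at ha
      exact if_pos (by omega)
    · -- l > 0
      have h1 : min (min (min 0 l) 0) l = 0 := by omega
      have h2 : max (max (max 0 l) 0) l = l := by omega
      rw [h1, h2, PySem.List.pyRange_one_succ_right (show (0:Int) ≤ l by omega),
        List.flatMap_append, List.flatMap_cons, List.flatMap_nil, List.append_nil,
        if_pos (Or.inr (le_refl l)), List.append_nil]
      refine List.flatMap_congr ?_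
      intro a ha
      rw [PySem.List.mem_pyRange_one] at ha
      rw [if_neg (by omega)]
      have hb0 : (-(PySem.Int.floordiv (-q * a) l) - 1) * l < q * a ∧
          q * a ≤ -(PySem.Int.floordiv (-q * a) l) * l := by
        rw [show (-q) * a = -(q * a) from neg_mul q a]
        exact (PySem.Int.neg_floordiv_neg_eq_iff_of_pos hl).mp rfl
      set b0 : Int := -(PySem.Int.floordiv (-q * a) l)
      rcases le_or_gt m 0 with hm | hm
      · -- m ≤ 0 : A's filter accepts nothing, B's inner range is empty
        rw [PySem.List.pyRange_one_eq_nil hm, List.map_nil]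
        have : (PySem.List.pyRange (min (min (min 0 q) m) (q + m))
            (max (max (max 0 q) m) (q + m) + 1) 1).filter
            (fun b => decide (¬(l * b - q * a < 0 ∨ l * b - q * a ≥ m * l))) = [] := by
          rw [List.filter_eq_nil_iff]
          intro b _
          simp only [decide_eq_true_eq, not_not]
          by_contra h
          rw [not_or, not_lt, not_le] at h
          have hml : m * l ≤ 0 := mul_nonpos_of_nonpos_of_nonneg hm (le_of_lt hl)
          omega
        rw [this, List.map_nil]
      · -- m > 0 : A's filter is exactly the contiguous block [b0, b0 + m)
        have hbb := pv_b0_bounds l q a b0 hl ha.1 ha.2 hb0.1 hb0.2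
        rw [pv_filter_interval (min (min (min 0 q) m) (q + m))
          (max (max (max 0 q) m) (q + m) + 1) b0 (b0 + m)
          (fun b => ¬(l * b - q * a < 0 ∨ l * b - q * a ≥ m * l))
          (fun b => pv_accept_iff m l q a b0 b hl hb0.1 hb0.2)
          (by omega) (by omega) (by omega)]
        rw [PySem.List.pyRange_one b0 (b0 + m), PySem.List.pyRange_one 0 m]
        simp [List.map_map, Function.comp_def]
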